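-- pv_equiv track=rewrite | github.com/RideGreg/LeetCode | Python/maximum-sum-of-3-non-overlapping-subarrays.py | maxSumOfThreeSubarrays_ming
-- ===== SOURCE A (Python) =====
-- def maxSumOfThreeSubarrays_ming(nums, k):
--     N = len(nums)
--     dp = [[0] * N for _ in range(N)]  # store the sum of nums[i:j+1]
--     idx = [[0] * N for _ in range(N)] # store the starting idx of largest k-size subarray in nums[i:j+1]
--
--     # prepare the data
--     for i in range(N - k + 1):
--         dp[i][i + k - 1] = sum(nums[i:i + k])
--         idx[i][i + k - 1] = i
--     for size in range(k + 1, N + 1):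
--         for i in range(N - size + 1):
--             j = i + size - 1
--             if dp[i][j - 1] >= dp[i + 1][j]:
--                 dp[i][j] = dp[i][j - 1]
--                 idx[i][j] = idx[i][j - 1]
--             else:
--                 dp[i][j] = dp[i + 1][j]
--                 idx[i][j] = idx[i + 1][j]
--
--     # divide the whole array into 3 parts
--     max_sum, max_i, max_j, max_k = float('-inf'), None, None, None
--     for i in range(k, N - 2 * k + 1):
--         ssum = dp[0][i - 1] + dp[i][i+k-1] + dp[i+k][N - 1]
--         if ssum > max_sum:
--             max_sum, max_i, max_j, max_k = ssum, idx[0][i - 1], idx[i][i+k-1], idx[i+k][N - 1]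
--     return [max_i, max_j, max_k]
-- ===== SOURCE B (Python) =====
-- def maxSumOfThreeSubarrays_ming(nums, k):
--     n = len(nums)
--     if k <= 0 or n < 3 * k:
--         return [None, None, None]
--     # sliding window sums: W[i] = sum(nums[i:i+k])
--     m = n - k  # last window start
--     W = [0] * (m + 1)
--     s = sum(nums[:k])
--     W[0] = s
--     for i in range(1, m + 1):
--         s += nums[i + k - 1] - nums[i - 1]
--         W[i] = s
--     # left[i]: leftmost start of a max-sum window among starts 0..i
--     left = [0] * (m + 1)
--     b = 0
--     for i in range(1, m + 1):
--         if W[i] > W[b]: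
--             b = i
--         left[i] = b
--     # right[i]: leftmost start of a max-sum window among starts i..m
--     right = [0] * (m + 1)
--     b = m
--     right[m] = m
--     for i in range(m - 1, -1, -1):
--         if W[i] >= W[b]:
--             b = i
--         right[i] = b
--     ans, total = [None, None, None], None
--     for j in range(k, n - 2 * k + 1):
--         l, r = left[j - k], right[j + k]
--         t = W[l] + W[j] + W[r]
--         if total is None or t > total:
--             total, ans = t, [l, j, r]
--     return ans
-- ===== Notes on version B (the rewrite author's own statement) =====
-- stated objective: faster
-- what changed: Replaces A's O(N^2)-cell best-window interval table (dp/idx over all [i,j]) with O(N) sliding-window sums plus left/right best-window-start scan arrays and a single pass over the middle window start.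
import Mathlib
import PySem

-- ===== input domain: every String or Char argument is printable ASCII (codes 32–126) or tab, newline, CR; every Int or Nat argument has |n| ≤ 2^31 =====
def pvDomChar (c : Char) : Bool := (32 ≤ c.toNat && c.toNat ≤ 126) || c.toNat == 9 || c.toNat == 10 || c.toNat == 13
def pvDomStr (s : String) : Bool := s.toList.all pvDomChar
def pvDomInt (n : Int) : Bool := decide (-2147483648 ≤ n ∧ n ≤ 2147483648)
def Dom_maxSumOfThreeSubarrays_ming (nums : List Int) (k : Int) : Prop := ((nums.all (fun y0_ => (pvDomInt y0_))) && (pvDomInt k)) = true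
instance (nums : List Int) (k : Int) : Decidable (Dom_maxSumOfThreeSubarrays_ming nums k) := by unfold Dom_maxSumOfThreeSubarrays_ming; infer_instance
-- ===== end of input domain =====

-- B replaces A's O(N^2) best-window table with sliding window sums and two linear
-- best-window scans (left/right), a single pass over the middle window start.

-- ===== PORT A =====
-- 2D table as a function with pointwise update (Python: list-of-lists index assignment)
def pvUpd2 (t : Int → Int → Int) (i j v : Int) : Int → Int → Int :=
  fun a b => if a = i ∧ b = j then v else t a b

def maxSumOfThreeSubarrays_ming (nums : List Int) (k : Int) : List (Option Int) :=
  let N : Int := PySem.List.len nums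
  -- dp[i][j] = sum of the best k-window in nums[i:j+1]; idx[i][j] = its start
  let st1 := (PySem.List.pyRange 0 (N - k + 1) 1).foldl
    (fun (st : (Int → Int → Int) × (Int → Int → Int)) i =>
      (pvUpd2 st.1 i (i + k - 1) ((PySem.List.slice nums (some i) (some (i + k))).sum),
       pvUpd2 st.2 i (i + k - 1) i))
    ((fun _ _ => 0), (fun _ _ => 0))
  let st2 := (PySem.List.pyRange (k + 1) (N + 1) 1).foldl
    (fun st size =>
      (PySem.List.pyRange 0 (N - size + 1) 1).foldl
        (fun (st : (Int → Int → Int) × (Int → Int → Int)) i =>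
          let j := i + size - 1
          if st.1 (i + 1) j ≤ st.1 i (j - 1) then
            (pvUpd2 st.1 i j (st.1 i (j - 1)), pvUpd2 st.2 i j (st.2 i (j - 1)))
          else
            (pvUpd2 st.1 i j (st.1 (i + 1) j), pvUpd2 st.2 i j (st.2 (i + 1) j)))
        st)
    st1
  let dp := st2.1
  let idx := st2.2
  -- max_sum = float('-inf') modelled as `none` (smaller than every Int)
  let fin := (PySem.List.pyRange k (N - 2 * k + 1) 1).foldl
    (fun (st : Option Int × Option Int × Option Int × Option Int) i =>
      let ssum := dp 0 (i - 1) + dp i (i + k - 1) + dp (i + k) (N - 1)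
      if (match st.1 with | none => true | some m => decide (m < ssum)) then
        (some ssum, some (idx 0 (i - 1)), some (idx i (i + k - 1)), some (idx (i + k) (N - 1)))
      else st)
    (none, none, none, none)
  [fin.2.1, fin.2.2.1, fin.2.2.2]

def maxSumOfThreeSubarrays_ming_alt (nums : List Int) (k : Int) : List (Option Int) :=
  let n : Int := PySem.List.len nums
  if k ≤ 0 ∨ n < 3 * k then [none, none, none] else
  let m := n - k
  let s0 := (PySem.List.slice nums none (some k)).sum
  let W0 := PySem.List.pySetD (List.replicate (m + 1).toNat 0) 0 s0
  let sW := (PySem.List.pyRange 1 (m + 1) 1).foldl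
    (fun (sW : Int × List Int) i =>
      let s := sW.1 + PySem.List.pyGetD nums (i + k - 1) 0 - PySem.List.pyGetD nums (i - 1) 0
      (s, PySem.List.pySetD sW.2 i s))
    (s0, W0)
  let W := sW.2
  let bl := (PySem.List.pyRange 1 (m + 1) 1).foldl
    (fun (bl : Int × List Int) i =>
      let b := if PySem.List.pyGetD W bl.1 0 < PySem.List.pyGetD W i 0 then i else bl.1
      (b, PySem.List.pySetD bl.2 i b))
    (0, List.replicate (m + 1).toNat 0)
  let left := bl.2
  let br := (PySem.List.pyRange (m - 1) (-1) (-1)).foldl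
    (fun (br : Int × List Int) i =>
      let b := if PySem.List.pyGetD W br.1 0 ≤ PySem.List.pyGetD W i 0 then i else br.1
      (b, PySem.List.pySetD br.2 i b))
    (m, PySem.List.pySetD (List.replicate (m + 1).toNat 0) m m)
  let right := br.2
  let fin := (PySem.List.pyRange k (n - 2 * k + 1) 1).foldl
    (fun (st : List (Option Int) × Option Int) j =>
      let l := PySem.List.pyGetD left (j - k) 0
      let r := PySem.List.pyGetD right (j + k) 0
      let t := PySem.List.pyGetD W l 0 + PySem.List.pyGetD W j 0 + PySem.List.pyGetD W r 0
      if (match st.2 with | none => true | some tot => decide (tot < t)) then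
        ([some l, some j, some r], some t)
      else st)
    ([none, none, none], none)
  fin.1


-- ===== PRECONDITION & SPEC =====
-- Pre_ excludes exactly k ≤ 0, where the Python A always raises IndexError.
def Pre_maxSumOfThreeSubarrays_ming (nums : List Int) (k : Int) : Prop := 1 ≤ k
instance (nums : List Int) (k : Int) : Decidable (Pre_maxSumOfThreeSubarrays_ming nums k) := by unfold Pre_maxSumOfThreeSubarrays_ming; infer_instance
def pvWitness_maxSumOfThreeSubarrays_ming : List Int × Int := ([1, 2, 1, 2, 6, 7, 5, 1], 2)

def Spec_maxSumOfThreeSubarrays_ming (nums : List Int) (k : Int) (out : List (Option Int)) : Prop := out = maxSumOfThreeSubarrays_ming_alt nums k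
instance (nums : List Int) (k : Int) (out : List (Option Int)) : Decidable (Spec_maxSumOfThreeSubarrays_ming nums k out) := by unfold Spec_maxSumOfThreeSubarrays_ming; infer_instance

-- ===== CLAIM (what is proved, stated in full; the proofs are below) =====
def Claim_equal_maxSumOfThreeSubarrays_ming : Prop := ∀ (nums : List Int) (k : Int), Dom_maxSumOfThreeSubarrays_ming nums k → Pre_maxSumOfThreeSubarrays_ming nums k → Spec_maxSumOfThreeSubarrays_ming nums k (maxSumOfThreeSubarrays_ming nums k)
-- ===== LEMMAS AND PROOFS =====

-- window-sum function: value of the k-window of nums starting at i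
def pvWin (nums : List Int) (K : Nat) (i : Int) : Int := ((nums.drop i.toNat).take K).sum

-- leftmost position of a maximal W-value among starts a, a+1, …, a+len
def pvBest (W : Int → Int) (a : Int) : Nat → Int
  | 0 => a
  | len + 1 => if W (pvBest W a len) < W (a + (len : Int) + 1) then a + (len : Int) + 1 else pvBest W a len

theorem pvBest_mem (W : Int → Int) (a : Int) (len : Nat) : a ≤ pvBest W a len ∧ pvBest W a len ≤ a + len := by
  induction len with
  | zero => simp [pvBest]
  | succ n ih => simp only [pvBest]; split <;> push_cast <;> omega

theorem pvBest_le (W : Int → Int) (a : Int) (len : Nat) : ∀ q, a ≤ q → q ≤ a + len → W q ≤ W (pvBest W a len) := by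
  induction len with
  | zero => intro q h1 h2; have : q = a := by push_cast at h2; omega
            subst this; simp [pvBest]
  | succ n ih =>
    intro q h1 h2
    simp only [pvBest]; split
    next h =>
      rcases (by omega : q < a + (n:Int) + 1 ∨ a + (n:Int) + 1 ≤ q) with hq | hq
      · exact le_of_lt (lt_of_le_of_lt (ih q h1 (by omega)) h)
      · have : q = a + (n:Int) + 1 := by push_cast at h2; omega
        subst this; exact le_refl _
    next h =>
      rcases (by omega : q < a + (n:Int) + 1 ∨ a + (n:Int) + 1 ≤ q) with hq | hq
      · exact ih q h1 (by omega)
      · have : q = a + (n:Int) + 1 := by push_cast at h2; omega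
        subst this; omega

theorem pvBest_lt (W : Int → Int) (a : Int) (len : Nat) : ∀ q, a ≤ q → q < pvBest W a len → W q < W (pvBest W a len) := by
  induction len with
  | zero => intro q h1 h2; simp only [pvBest] at h2; omega
  | succ n ih =>
    intro q h1 h2
    simp only [pvBest] at h2 ⊢; split
    next h =>
      simp only [if_pos h] at h2
      rcases (by omega : q < a + (n:Int) + 1 ∨ a + (n:Int) + 1 ≤ q) with hq | hq
      · exact lt_of_le_of_lt (pvBest_le W a n q h1 (by omega)) h
      · omega
    next h =>
      simp only [if_neg h] at h2
      exact ih q h1 h2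

theorem pvBest_unique (W : Int → Int) (a : Int) (len : Nat) (p : Int)
    (hmem : a ≤ p ∧ p ≤ a + len)
    (hle : ∀ q, a ≤ q → q ≤ a + (len:Int) → W q ≤ W p)
    (hlt : ∀ q, a ≤ q → q < p → W q < W p) :
    pvBest W a len = p := by
  have hb := pvBest_mem W a len
  have h1 : W (pvBest W a len) ≤ W p := hle _ hb.1 hb.2
  have h2 : W p ≤ W (pvBest W a len) := pvBest_le W a len p hmem.1 hmem.2
  rcases lt_trichotomy (pvBest W a len) p with h | h | h
  · have := hlt _ hb.1 h; omega
  · exact h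
  · have := pvBest_lt W a len p hmem.1 h; omega

theorem pvBest_union (W : Int → Int) (a : Int) (len : Nat) :
    pvBest W a (len + 1) =
      if W (pvBest W a len) < W (pvBest W (a + 1) len) then pvBest W (a + 1) len else pvBest W a len := by
  have hb1 := pvBest_mem W a len
  have hb2 := pvBest_mem W (a + 1) len
  split
  next h =>
    refine pvBest_unique W a (len + 1) _ ⟨by omega, by push_cast; omega⟩ ?_ ?_
    · intro q hq1 hq2
      rcases (by omega : q = a ∨ a + 1 ≤ q) with heq | hq1'
      · rw [heq]
        exact le_of_lt (lt_of_le_of_lt (pvBest_le W a len a (le_refl _) (by omega)) h)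
      · exact pvBest_le W (a + 1) len q hq1' (by push_cast at hq2; omega)
    · intro q hq1 hq2
      rcases (by omega : q = a ∨ a + 1 ≤ q) with heq | hq1'
      · rw [heq]
        exact lt_of_le_of_lt (pvBest_le W a len a (le_refl _) (by omega)) h
      · exact pvBest_lt W (a + 1) len q hq1' hq2
  next h =>
    refine pvBest_unique W a (len + 1) _ ⟨hb1.1, by push_cast; omega⟩ ?_ ?_
    · intro q hq1 hq2
      rcases (by omega : q ≤ a + (len:Int) ∨ a + (len:Int) < q) with hq3 | hq3
      · exact pvBest_le W a len q hq1 hq3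
      · have := pvBest_le W (a + 1) len q (by omega) (by push_cast at hq2; omega)
        omega
    · intro q hq1 hq2
      exact pvBest_lt W a len q hq1 hq2

theorem pvBest_rscan (W : Int → Int) (a : Int) (len : Nat) :
    pvBest W a (len + 1) =
      if W (pvBest W (a + 1) len) ≤ W a then a else pvBest W (a + 1) len := by
  have hb2 := pvBest_mem W (a + 1) len
  split
  next h =>
    refine pvBest_unique W a (len + 1) _ ⟨le_refl _, by push_cast; omega⟩ ?_ ?_
    · intro q hq1 hq2
      rcases (by omega : q = a ∨ a + 1 ≤ q) with heq | hq1'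
      · rw [heq]
      · exact le_trans (pvBest_le W (a + 1) len q hq1' (by push_cast at hq2; omega)) h
    · intro q hq1 hq2; omega
  next h =>
    refine pvBest_unique W a (len + 1) _ ⟨by omega, by push_cast; omega⟩ ?_ ?_
    · intro q hq1 hq2
      rcases (by omega : q = a ∨ a + 1 ≤ q) with heq | hq1'
      · rw [heq]; omega
      · exact pvBest_le W (a + 1) len q hq1' (by push_cast at hq2; omega)
    · intro q hq1 hq2
      rcases (by omega : q = a ∨ a + 1 ≤ q) with heq | hq1'
      · rw [heq]; omega
      · exact pvBest_lt W (a + 1) len q hq1' hq2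

theorem pvUpd2_eq (t : Int → Int → Int) (i j v a b : Int) :
    pvUpd2 t i j v a b = if a = i ∧ b = j then v else t a b := rfl

theorem pvWin_slice (nums : List Int) (k i : Int) (h : 0 ≤ i) (hk : 0 ≤ k) :
    (PySem.List.slice nums (some i) (some (i + k))).sum = pvWin nums k.toNat i := by
  rw [PySem.List.slice_toNat nums h (by omega)]
  have : (i + k).toNat - i.toNat = k.toNat := by omega
  rw [this]; rfl

theorem pvRange_toNat (e : Int) : PySem.List.pyRange 0 e 1 = PySem.List.pyRange 0 ((e.toNat : Int)) 1 := by
  rw [PySem.List.pyRange_one, PySem.List.pyRange_one]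
  norm_num
  congr 2
  omega

-- lookup after phase 1 of A: only the diagonal cells (a, a + k - 1), a < c, are written
theorem pvPhase1 (nums : List Int) (k : Int) (c : Nat) :
    ∀ a b : Int,
      (((PySem.List.pyRange 0 c 1).foldl
        (fun (st : (Int → Int → Int) × (Int → Int → Int)) i =>
          (pvUpd2 st.1 i (i + k - 1) ((PySem.List.slice nums (some i) (some (i + k))).sum),
           pvUpd2 st.2 i (i + k - 1) i))
        ((fun _ _ => 0), (fun _ _ => 0))).1 a b
        = if 0 ≤ a ∧ a < (c : Int) ∧ b = a + k - 1 then (PySem.List.slice nums (some a) (some (a + k))).sum else 0) ∧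
      (((PySem.List.pyRange 0 c 1).foldl
        (fun (st : (Int → Int → Int) × (Int → Int → Int)) i =>
          (pvUpd2 st.1 i (i + k - 1) ((PySem.List.slice nums (some i) (some (i + k))).sum),
           pvUpd2 st.2 i (i + k - 1) i))
        ((fun _ _ => 0), (fun _ _ => 0))).2 a b
        = if 0 ≤ a ∧ a < (c : Int) ∧ b = a + k - 1 then a else 0) := by
  induction c with
  | zero =>
    intro a b
    rw [PySem.List.pyRange_one_eq_nil (by omega)]
    simp only [List.foldl_nil]
    constructor <;> rw [if_neg (by omega)]
  | succ n ih =>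
    intro a b
    rw [show ((n + 1 : Nat) : Int) = (n : Int) + 1 by push_cast; ring,
        PySem.List.pyRange_one_succ_right (by omega), List.foldl_append]
    simp only [List.foldl_cons, List.foldl_nil]
    constructor
    · rw [pvUpd2_eq, (ih a b).1]
      by_cases hab : a = (n : Int) ∧ b = (n : Int) + k - 1
      · rw [if_pos hab, if_pos ⟨by omega, by omega, by omega⟩, hab.1]
      · rw [if_neg hab]
        by_cases h2 : 0 ≤ a ∧ a < (n : Int) ∧ b = a + k - 1
        · rw [if_pos h2, if_pos ⟨h2.1, by omega, h2.2.2⟩]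
        · have hneg : ¬(0 ≤ a ∧ a < (n : Int) + 1 ∧ b = a + k - 1) := by
            intro h3
            rcases h3 with ⟨h4, h5, h6⟩
            by_cases hA : a = (n : Int)
            · exact hab ⟨hA, by omega⟩
            · exact h2 ⟨h4, by omega, h6⟩
          rw [if_neg h2, if_neg hneg]
    · rw [pvUpd2_eq, (ih a b).2]
      by_cases hab : a = (n : Int) ∧ b = (n : Int) + k - 1
      · rw [if_pos hab, if_pos ⟨by omega, by omega, by omega⟩, hab.1]
      · rw [if_neg hab]
        by_cases h2 : 0 ≤ a ∧ a < (n : Int) ∧ b = a + k - 1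
        · rw [if_pos h2, if_pos ⟨h2.1, by omega, h2.2.2⟩]
        · have hneg : ¬(0 ≤ a ∧ a < (n : Int) + 1 ∧ b = a + k - 1) := by
            intro h3
            rcases h3 with ⟨h4, h5, h6⟩
            by_cases hA : a = (n : Int)
            · exact hab ⟨hA, by omega⟩
            · exact h2 ⟨h4, by omega, h6⟩
          rw [if_neg h2, if_neg hneg]

-- the cell (a,b) of A's tables holds max/leftmost-argmax over window starts a..b-k+1
def pvCellOK (nums : List Int) (k : Int) (st : (Int → Int → Int) × (Int → Int → Int)) (a b : Int) : Prop :=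
  st.1 a b = pvWin nums k.toNat (pvBest (pvWin nums k.toNat) a ((b - a + 1 - k).toNat)) ∧
  st.2 a b = pvBest (pvWin nums k.toNat) a ((b - a + 1 - k).toNat)

def pvTabOK (nums : List Int) (k S : Int) (st : (Int → Int → Int) × (Int → Int → Int)) : Prop :=
  ∀ a b : Int, 0 ≤ a → a + k - 1 ≤ b → b ≤ (nums.length : Int) - 1 → b - a + 1 ≤ S →
    pvCellOK nums k st a b

theorem pvPhase1_tabOK (nums : List Int) (k : Int) (hk : 1 ≤ k) :
    pvTabOK nums k k
      ((PySem.List.pyRange 0 ((nums.length : Int) - k + 1) 1).foldl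
        (fun (st : (Int → Int → Int) × (Int → Int → Int)) i =>
          (pvUpd2 st.1 i (i + k - 1) ((PySem.List.slice nums (some i) (some (i + k))).sum),
           pvUpd2 st.2 i (i + k - 1) i))
        ((fun _ _ => 0), (fun _ _ => 0))) := by
  intro a b ha hab hbN hspan
  have hb : b = a + k - 1 := by omega
  have hlt : a < (((nums.length : Int) - k + 1).toNat : Int) := by omega
  rw [pvRange_toNat]
  have h1 := pvPhase1 nums k ((nums.length : Int) - k + 1).toNat a b
  constructor
  · rw [h1.1, if_pos ⟨ha, hlt, hb⟩, pvWin_slice nums k a ha (by omega)]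
    have : (b - a + 1 - k).toNat = 0 := by omega
    rw [this]
    rfl
  · rw [h1.2, if_pos ⟨ha, hlt, hb⟩]
    have : (b - a + 1 - k).toNat = 0 := by omega
    rw [this]
    rfl

theorem pvPhase2_inner (nums : List Int) (k size : Int) (hk : 1 ≤ k) (hsize : k + 1 ≤ size)
    (st : (Int → Int → Int) × (Int → Int → Int)) (hst : pvTabOK nums k (size - 1) st) :
    ∀ c : Nat, (c : Int) ≤ (nums.length : Int) - size + 1 →
    (pvTabOK nums k (size - 1)
      ((PySem.List.pyRange 0 c 1).foldl
        (fun (st : (Int → Int → Int) × (Int → Int → Int)) i =>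
          let j := i + size - 1
          if st.1 (i + 1) j ≤ st.1 i (j - 1) then
            (pvUpd2 st.1 i j (st.1 i (j - 1)), pvUpd2 st.2 i j (st.2 i (j - 1)))
          else
            (pvUpd2 st.1 i j (st.1 (i + 1) j), pvUpd2 st.2 i j (st.2 (i + 1) j)))
        st)) ∧
    (∀ a b : Int, 0 ≤ a → a < (c : Int) → b = a + size - 1 →
      pvCellOK nums k
        ((PySem.List.pyRange 0 c 1).foldl
          (fun (st : (Int → Int → Int) × (Int → Int → Int)) i =>
            let j := i + size - 1
            if st.1 (i + 1) j ≤ st.1 i (j - 1) then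
              (pvUpd2 st.1 i j (st.1 i (j - 1)), pvUpd2 st.2 i j (st.2 i (j - 1)))
            else
              (pvUpd2 st.1 i j (st.1 (i + 1) j), pvUpd2 st.2 i j (st.2 (i + 1) j)))
          st) a b) := by
  intro c
  induction c with
  | zero =>
    intro _
    rw [PySem.List.pyRange_one_eq_nil (by omega)]
    exact ⟨hst, fun a b ha hac _ => by exact absurd hac (by omega)⟩
  | succ n ih =>
    intro hc
    obtain ⟨ih1, ih2⟩ := ih (by omega)
    rw [show ((n + 1 : Nat) : Int) = (n : Int) + 1 by push_cast; ring,
        PySem.List.pyRange_one_succ_right (by omega), List.foldl_append]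
    simp only [List.foldl_cons, List.foldl_nil]
    set st'' := (PySem.List.pyRange 0 (n : Int) 1).foldl
        (fun (st : (Int → Int → Int) × (Int → Int → Int)) i =>
          let j := i + size - 1
          if st.1 (i + 1) j ≤ st.1 i (j - 1) then
            (pvUpd2 st.1 i j (st.1 i (j - 1)), pvUpd2 st.2 i j (st.2 i (j - 1)))
          else
            (pvUpd2 st.1 i j (st.1 (i + 1) j), pvUpd2 st.2 i j (st.2 (i + 1) j)))
        st with hstdef
    set W := pvWin nums k.toNat with hW
    set L := (size - 1 - k).toNat with hLdef
    -- the two cells read at step i = n, both of span size - 1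
    have hL := ih1 (n : Int) ((n : Int) + size - 2) (by omega) (by omega) (by omega) (by omega)
    have hR := ih1 ((n : Int) + 1) ((n : Int) + size - 1) (by omega) (by omega) (by omega) (by omega)
    unfold pvCellOK at hL hR
    rw [show ((n : Int) + size - 2 - (n : Int) + 1 - k).toNat = L from by omega] at hL
    rw [show ((n : Int) + size - 1 - ((n : Int) + 1) + 1 - k).toNat = L from by omega] at hR
    have hj1 : (n : Int) + size - 1 - 1 = (n : Int) + size - 2 := by ring
    have hspan1 : ((n : Int) + size - 1 - (n : Int) + 1 - k).toNat = L + 1 := by omega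
    -- value of the freshly written cell, via the union property of leftmost argmax
    have hnew : pvBest W (n : Int) (L + 1) =
        if W (pvBest W ((n : Int) + 1) L) ≤ W (pvBest W (n : Int) L)
        then pvBest W (n : Int) L else pvBest W ((n : Int) + 1) L := by
      rw [pvBest_union]
      by_cases h : W (pvBest W (n : Int) L) < W (pvBest W ((n : Int) + 1) L)
      · rw [if_pos h, if_neg (by omega)]
      · rw [if_neg h, if_pos (by omega)]
    by_cases hcond : st''.1 ((n : Int) + 1) ((n : Int) + size - 1) ≤ st''.1 (n : Int) ((n : Int) + size - 1 - 1)
    · rw [if_pos hcond]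
      rw [hj1] at hcond
      have hcond' : W (pvBest W ((n : Int) + 1) L) ≤ W (pvBest W (n : Int) L) := by
        rw [hL.1, hR.1] at hcond; exact hcond
      constructor
      · intro a b ha hab hbN hspan
        have hne : ¬(a = (n : Int) ∧ b = (n : Int) + size - 1) := by intro h; omega
        have hprev := ih1 a b ha hab hbN hspan
        unfold pvCellOK at hprev ⊢
        dsimp only
        rw [pvUpd2_eq, pvUpd2_eq, if_neg hne, if_neg hne]
        exact hprev
      · intro a b ha hac hb
        rcases (by omega : a = (n : Int) ∨ a < (n : Int)) with hA | hA
        · subst hb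
          rw [hA]
          unfold pvCellOK
          dsimp only
          rw [pvUpd2_eq, pvUpd2_eq, if_pos ⟨rfl, rfl⟩, if_pos ⟨rfl, rfl⟩, hspan1, hnew,
              if_pos hcond', hj1, hL.1, hL.2]
          exact ⟨rfl, rfl⟩
        · have hne : ¬(a = (n : Int) ∧ b = (n : Int) + size - 1) := by intro h; omega
          have hprev := ih2 a b ha (by omega) hb
          unfold pvCellOK at hprev ⊢
          dsimp only
          rw [pvUpd2_eq, pvUpd2_eq, if_neg hne, if_neg hne]
          exact hprev
    · rw [if_neg hcond]
      rw [hj1] at hcond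
      have hcond' : ¬ (W (pvBest W ((n : Int) + 1) L) ≤ W (pvBest W (n : Int) L)) := by
        rw [hL.1, hR.1] at hcond; exact hcond
      constructor
      · intro a b ha hab hbN hspan
        have hne : ¬(a = (n : Int) ∧ b = (n : Int) + size - 1) := by intro h; omega
        have hprev := ih1 a b ha hab hbN hspan
        unfold pvCellOK at hprev ⊢
        dsimp only
        rw [pvUpd2_eq, pvUpd2_eq, if_neg hne, if_neg hne]
        exact hprev
      · intro a b ha hac hb
        rcases (by omega : a = (n : Int) ∨ a < (n : Int)) with hA | hA
        · subst hb
          rw [hA]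
          unfold pvCellOK
          dsimp only
          rw [pvUpd2_eq, pvUpd2_eq, if_pos ⟨rfl, rfl⟩, if_pos ⟨rfl, rfl⟩, hspan1, hnew,
              if_neg hcond', hR.1, hR.2]
          exact ⟨rfl, rfl⟩
        · have hne : ¬(a = (n : Int) ∧ b = (n : Int) + size - 1) := by intro h; omega
          have hprev := ih2 a b ha (by omega) hb
          unfold pvCellOK at hprev ⊢
          dsimp only
          rw [pvUpd2_eq, pvUpd2_eq, if_neg hne, if_neg hne]
          exact hprev

theorem pvPhase2_outer (nums : List Int) (k : Int) (hk : 1 ≤ k)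
    (st : (Int → Int → Int) × (Int → Int → Int)) (hst : pvTabOK nums k k st) :
    ∀ t : Nat, pvTabOK nums k (k + t)
      ((PySem.List.pyRange (k + 1) (k + 1 + (t : Int)) 1).foldl
        (fun st size =>
          (PySem.List.pyRange 0 ((nums.length : Int) - size + 1) 1).foldl
            (fun (st : (Int → Int → Int) × (Int → Int → Int)) i =>
              let j := i + size - 1
              if st.1 (i + 1) j ≤ st.1 i (j - 1) then
                (pvUpd2 st.1 i j (st.1 i (j - 1)), pvUpd2 st.2 i j (st.2 i (j - 1)))
              else
                (pvUpd2 st.1 i j (st.1 (i + 1) j), pvUpd2 st.2 i j (st.2 (i + 1) j)))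
            st)
        st) := by
  intro t
  induction t with
  | zero =>
    rw [show k + 1 + ((0 : Nat) : Int) = k + 1 from by push_cast; ring,
        PySem.List.pyRange_one_eq_nil (by omega)]
    simpa using hst
  | succ t ih =>
    rw [show k + 1 + ((t + 1 : Nat) : Int) = (k + 1 + (t : Int)) + 1 from by push_cast; ring,
        PySem.List.pyRange_one_succ_right (by omega), List.foldl_append]
    simp only [List.foldl_cons, List.foldl_nil]
    set prev := (PySem.List.pyRange (k + 1) (k + 1 + (t : Int)) 1).foldl
        (fun st size =>
          (PySem.List.pyRange 0 ((nums.length : Int) - size + 1) 1).foldl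
            (fun (st : (Int → Int → Int) × (Int → Int → Int)) i =>
              let j := i + size - 1
              if st.1 (i + 1) j ≤ st.1 i (j - 1) then
                (pvUpd2 st.1 i j (st.1 i (j - 1)), pvUpd2 st.2 i j (st.2 i (j - 1)))
              else
                (pvUpd2 st.1 i j (st.1 (i + 1) j), pvUpd2 st.2 i j (st.2 (i + 1) j)))
            st)
        st with hprev
    have ih' : pvTabOK nums k (k + 1 + (t : Int) - 1) prev := by
      rw [show k + 1 + (t : Int) - 1 = k + (t : Int) from by ring]
      exact ih
    rcases (by omega : k + 1 + (t : Int) ≤ (nums.length : Int) ∨ (nums.length : Int) < k + 1 + (t : Int)) with hN | hN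
    · obtain ⟨p1, p2⟩ := pvPhase2_inner nums k (k + 1 + (t : Int)) hk (by omega) prev ih'
        (((nums.length : Int) - (k + 1 + (t : Int)) + 1).toNat) (by omega)
      rw [pvRange_toNat]
      intro a b ha hab hbN hspan
      rcases (by omega : b - a + 1 ≤ k + 1 + (t : Int) - 1 ∨ b = a + (k + 1 + (t : Int)) - 1) with hsp | hsp
      · exact p1 a b ha hab hbN hsp
      · exact p2 a b ha (by omega) (by omega)
    · rw [PySem.List.pyRange_one_eq_nil (by omega)]
      simp only [List.foldl_nil]
      intro a b ha hab hbN hspan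
      exact ih' a b ha hab hbN (by omega)

theorem pvGetD_int (lst : List Int) (q : Int) (h0 : 0 ≤ q) :
    PySem.List.pyGetD lst q 0 = lst.getD q.toNat 0 := by
  rw [show q = ((q.toNat : Nat) : Int) from by omega, PySem.List.pyGetD_natCast]
  rw [List.getD_eq_getElem?_getD, List.getD_eq_getElem?_getD,
      show (((q.toNat : Nat) : Int)).toNat = q.toNat from by omega]

theorem pvWin_pre (nums : List Int) (K : Nat) (j : Nat) :
    pvWin nums K (j : Int) = (nums.take (j + K)).sum - (nums.take j).sum := by
  unfold pvWin
  rw [show ((j : Int)).toNat = j from by omega, List.take_add, List.sum_append]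
  ring

theorem pvWin_slide (nums : List Int) (K : Nat) (c : Nat) (h : c + 1 + K ≤ nums.length) :
    pvWin nums K ((c : Int) + 1) =
      pvWin nums K (c : Int) + nums[c + K]'(by omega) - nums[c]'(by omega) := by
  have e1 := pvWin_pre nums K (c + 1)
  have e2 := pvWin_pre nums K c
  have e3 := List.sum_take_succ nums (c + K) (by omega)
  have e4 := List.sum_take_succ nums c (by omega)
  rw [show ((c + 1 : Nat) : Int) = (c : Int) + 1 from by push_cast; ring] at e1
  rw [show c + 1 + K = (c + K) + 1 from by omega] at e1
  rw [e1, e2, e3, e4]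
  ring

theorem pvWin_zero (nums : List Int) (k : Int) (hk : 0 ≤ k) :
    (PySem.List.slice nums none (some k)).sum = pvWin nums k.toNat 0 := by
  rw [PySem.List.slice_to nums hk]
  unfold pvWin
  rfl

-- B's sliding-window loop (first c iterations)
def pvB1 (nums : List Int) (k c : Int) : Int × List Int :=
  (PySem.List.pyRange 1 (c + 1) 1).foldl
    (fun (sW : Int × List Int) i =>
      let s := sW.1 + PySem.List.pyGetD nums (i + k - 1) 0 - PySem.List.pyGetD nums (i - 1) 0
      (s, PySem.List.pySetD sW.2 i s))
    ((PySem.List.slice nums none (some k)).sum,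
     PySem.List.pySetD (List.replicate ((nums.length : Int) - k + 1).toNat 0) 0
       ((PySem.List.slice nums none (some k)).sum))

theorem pvB1_succ (nums : List Int) (k : Int) (c : Nat) :
    pvB1 nums k ((c : Int) + 1) =
      (let sW := pvB1 nums k (c : Int)
       let s := sW.1 + PySem.List.pyGetD nums (((c : Int) + 1) + k - 1) 0
                     - PySem.List.pyGetD nums (((c : Int) + 1) - 1) 0
       (s, PySem.List.pySetD sW.2 ((c : Int) + 1) s)) := by
  unfold pvB1
  rw [PySem.List.pyRange_one_succ_right (by omega), List.foldl_append]
  rfl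

-- B's sliding-window loop fills W with the window sums
theorem pvBLoop1 (nums : List Int) (k : Int) (hk : 1 ≤ k) (hkN : k ≤ (nums.length : Int)) :
    ∀ c : Nat, (c : Int) ≤ (nums.length : Int) - k →
      (pvB1 nums k (c : Int)).1 = pvWin nums k.toNat (c : Int) ∧
      (pvB1 nums k (c : Int)).2.length = ((nums.length : Int) - k + 1).toNat ∧
      (∀ p : Nat, (p : Int) ≤ (c : Int) →
        (pvB1 nums k (c : Int)).2.getD p 0 = pvWin nums k.toNat (p : Int)) := by
  intro c
  induction c with
  | zero =>
    intro _
    unfold pvB1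
    rw [PySem.List.pyRange_one_eq_nil (by omega)]
    simp only [List.foldl_nil]
    refine ⟨by rw [pvWin_zero nums k (by omega)]; norm_num, ?_, ?_⟩
    · rw [PySem.List.pySetD_of_nonneg _ _ (by omega), List.length_set, List.length_replicate]
    · intro p hp
      have hp0 : p = 0 := by omega
      subst hp0
      rw [PySem.List.pySetD_of_nonneg _ _ (by omega)]
      rw [List.getD_eq_getElem?_getD]
      rw [show ((0 : Int)).toNat = 0 from rfl, List.getElem?_set_self (by simp; omega)]
      simp only [Option.getD_some]
      rw [pvWin_zero nums k (by omega)]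
      norm_num
  | succ c ih =>
    intro hc
    obtain ⟨ih1, ih2, ih3⟩ := ih (by omega)
    rw [show ((c + 1 : Nat) : Int) = (c : Int) + 1 from by push_cast; ring, pvB1_succ]
    have hg1 : PySem.List.pyGetD nums (((c : Int) + 1) + k - 1) 0 = nums[c + k.toNat]'(by omega) := by
      rw [pvGetD_int nums _ (by omega), List.getD_eq_getElem?_getD,
          show (((c : Int) + 1) + k - 1).toNat = c + k.toNat from by omega,
          List.getElem?_eq_getElem (by omega)]
      rfl
    have hg2 : PySem.List.pyGetD nums (((c : Int) + 1) - 1) 0 = nums[c]'(by omega) := by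
      rw [pvGetD_int nums _ (by omega), List.getD_eq_getElem?_getD,
          show (((c : Int) + 1) - 1).toNat = c from by omega,
          List.getElem?_eq_getElem (by omega)]
      rfl
    have hs : pvWin nums k.toNat ((c : Int) + 1) =
        pvWin nums k.toNat (c : Int) + nums[c + k.toNat]'(by omega) - nums[c]'(by omega) :=
      pvWin_slide nums k.toNat c (by omega)
    refine ⟨?_, ?_, ?_⟩
    · dsimp only
      rw [ih1, hg1, hg2, hs]
    · dsimp only
      rw [PySem.List.pySetD_of_nonneg _ _ (by omega), List.length_set]
      exact ih2
    · intro p hp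
      dsimp only
      rw [PySem.List.pySetD_of_nonneg _ _ (by omega),
          show ((c : Int) + 1).toNat = c + 1 from by omega, List.getD_eq_getElem?_getD]
      rcases (by omega : p = c + 1 ∨ (p : Int) ≤ (c : Int)) with hp1 | hp1
      · subst hp1
        rw [List.getElem?_set_self (by rw [ih2]; omega)]
        simp only [Option.getD_some]
        rw [ih1, hg1, hg2, show ((c + 1 : Nat) : Int) = (c : Int) + 1 from by push_cast; ring, hs]
      · rw [List.getElem?_set_ne (by omega)]
        rw [← List.getD_eq_getElem?_getD]
        exact ih3 p hp1

-- B's left scan (first c iterations)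
def pvB2 (Wl : List Int) (mlen c : Int) : Int × List Int :=
  (PySem.List.pyRange 1 (c + 1) 1).foldl
    (fun (bl : Int × List Int) i =>
      let b := if PySem.List.pyGetD Wl bl.1 0 < PySem.List.pyGetD Wl i 0 then i else bl.1
      (b, PySem.List.pySetD bl.2 i b))
    (0, List.replicate (mlen + 1).toNat 0)

theorem pvBLoop2 (Wl : List Int) (m : Int) (f : Int → Int) (hm : 0 ≤ m)
    (hW : ∀ q : Int, 0 ≤ q → q ≤ m → PySem.List.pyGetD Wl q 0 = f q)
    (hlen : Wl.length = (m + 1).toNat) :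
    ∀ c : Nat, (c : Int) ≤ m →
      (pvB2 Wl m (c : Int)).1 = pvBest f 0 c ∧
      (pvB2 Wl m (c : Int)).2.length = (m + 1).toNat ∧
      (∀ p : Nat, (p : Int) ≤ (c : Int) → (pvB2 Wl m (c : Int)).2.getD p 0 = pvBest f 0 p) := by
  intro c
  induction c with
  | zero =>
    intro _
    unfold pvB2
    rw [PySem.List.pyRange_one_eq_nil (by omega)]
    simp only [List.foldl_nil]
    refine ⟨rfl, by rw [List.length_replicate], ?_⟩
    intro p hp
    have hp0 : p = 0 := by omega
    subst hp0
    rw [List.getD_eq_getElem?_getD, List.getElem?_replicate_of_lt (by omega)]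
    rfl
  | succ c ih =>
    intro hc
    obtain ⟨ih1, ih2, ih3⟩ := ih (by omega)
    have hstep : pvB2 Wl m ((c + 1 : Nat) : Int) =
        (let bl := pvB2 Wl m (c : Int)
         let b := if PySem.List.pyGetD Wl bl.1 0 < PySem.List.pyGetD Wl ((c : Int) + 1) 0
                  then (c : Int) + 1 else bl.1
         (b, PySem.List.pySetD bl.2 ((c : Int) + 1) b)) := by
      unfold pvB2
      rw [show ((c + 1 : Nat) : Int) + 1 = ((c : Int) + 1) + 1 from by push_cast; ring,
          PySem.List.pyRange_one_succ_right (by omega), List.foldl_append]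
      rfl
    have hmem := pvBest_mem f 0 c
    have hb : PySem.List.pyGetD Wl (pvB2 Wl m (c : Int)).1 0 = f (pvBest f 0 c) := by
      rw [ih1]; exact hW _ (by omega) (by omega)
    have hi : PySem.List.pyGetD Wl ((c : Int) + 1) 0 = f ((c : Int) + 1) :=
      hW _ (by omega) (by omega)
    have hbest : pvBest f 0 (c + 1) =
        if f (pvBest f 0 c) < f ((c : Int) + 1) then (c : Int) + 1 else pvBest f 0 c := by
      show (if f (pvBest f 0 c) < f (0 + (c : Int) + 1) then 0 + (c : Int) + 1 else pvBest f 0 c) = _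
      rw [show (0 : Int) + (c : Int) + 1 = (c : Int) + 1 from by ring]
    refine ⟨?_, ?_, ?_⟩
    · rw [hstep]
      dsimp only
      rw [hb, hi, ih1, hbest]
    · rw [hstep]
      dsimp only
      rw [PySem.List.pySetD_of_nonneg _ _ (by omega), List.length_set]
      exact ih2
    · intro p hp
      rw [hstep]
      dsimp only
      rw [PySem.List.pySetD_of_nonneg _ _ (by omega),
          show ((c : Int) + 1).toNat = c + 1 from by omega, List.getD_eq_getElem?_getD]
      rcases (by omega : p = c + 1 ∨ (p : Int) ≤ (c : Int)) with hp1 | hp1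
      · subst hp1
        rw [List.getElem?_set_self (by rw [ih2]; omega)]
        simp only [Option.getD_some]
        rw [hb, hi, ih1, hbest]
      · rw [List.getElem?_set_ne (by omega), ← List.getD_eq_getElem?_getD]
        exact ih3 p hp1

-- B's right scan, processing i = a, a-1, …, 0
def pvB3 (Wl : List Int) (a : Int) (bst : Int × List Int) : Int × List Int :=
  (PySem.List.pyRange a (-1) (-1)).foldl
    (fun (br : Int × List Int) i =>
      let b := if PySem.List.pyGetD Wl br.1 0 ≤ PySem.List.pyGetD Wl i 0 then i else br.1
      (b, PySem.List.pySetD br.2 i b))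
    bst

theorem pvBLoop3 (Wl : List Int) (m : Int) (f : Int → Int) (hm : 0 ≤ m)
    (hW : ∀ q : Int, 0 ≤ q → q ≤ m → PySem.List.pyGetD Wl q 0 = f q) :
    ∀ d : Nat, (d : Int) ≤ m → ∀ bst : Int × List Int,
      bst.1 = pvBest f (d : Int) ((m - d).toNat) →
      bst.2.length = (m + 1).toNat →
      (∀ p : Nat, d ≤ p → (p : Int) ≤ m → bst.2.getD p 0 = pvBest f (p : Int) ((m - p).toNat)) →
      ((pvB3 Wl ((d : Int) - 1) bst).1 = pvBest f 0 m.toNat ∧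
       (pvB3 Wl ((d : Int) - 1) bst).2.length = (m + 1).toNat ∧
       (∀ p : Nat, (p : Int) ≤ m → (pvB3 Wl ((d : Int) - 1) bst).2.getD p 0 = pvBest f (p : Int) ((m - p).toNat))) := by
  intro d
  induction d with
  | zero =>
    intro _ bst h1 h2 h3
    unfold pvB3
    rw [show ((0 : Nat) : Int) - 1 = (-1 : Int) from by norm_num,
        PySem.List.pyRange_neg_one_eq_nil (by omega)]
    simp only [List.foldl_nil]
    refine ⟨?_, h2, fun p hp => h3 p (by omega) hp⟩
    rw [h1]
    norm_num
  | succ n ih =>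
    intro hd bst h1 h2 h3
    unfold pvB3
    rw [show ((n + 1 : Nat) : Int) - 1 = (n : Int) from by push_cast; ring,
        PySem.List.pyRange_neg_one_cons (by omega)]
    simp only [List.foldl_cons]
    have hmem := pvBest_mem f ((n : Int) + 1) ((m - (n + 1)).toNat)
    have hb : PySem.List.pyGetD Wl bst.1 0 = f (pvBest f ((n : Int) + 1) ((m - (n + 1)).toNat)) := by
      rw [h1, show ((n + 1 : Nat) : Int) = (n : Int) + 1 from by push_cast; ring]
      exact hW _ (by omega) (by omega)
    have hi : PySem.List.pyGetD Wl ((n : Int)) 0 = f ((n : Int)) := hW _ (by omega) (by omega)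
    have hbest : pvBest f ((n : Int)) ((m - n).toNat) =
        if f (pvBest f ((n : Int) + 1) ((m - (n + 1)).toNat)) ≤ f ((n : Int)) then (n : Int)
        else pvBest f ((n : Int) + 1) ((m - (n + 1)).toNat) := by
      rw [show (m - (n : Int)).toNat = (m - ((n : Int) + 1)).toNat + 1 from by omega, pvBest_rscan]
    have hb' : (if PySem.List.pyGetD Wl bst.1 0 ≤ PySem.List.pyGetD Wl ((n : Int)) 0 then (n : Int) else bst.1)
        = pvBest f ((n : Int)) ((m - n).toNat) := by
      rw [hb, hi, h1, hbest, show ((n + 1 : Nat) : Int) = (n : Int) + 1 from by push_cast; ring]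
    have := ih (by omega)
      (let b := if PySem.List.pyGetD Wl bst.1 0 ≤ PySem.List.pyGetD Wl ((n : Int)) 0 then (n : Int) else bst.1
       (b, PySem.List.pySetD bst.2 ((n : Int)) b))
      (by dsimp only; rw [hb'])
      (by dsimp only; rw [PySem.List.pySetD_of_nonneg _ _ (by omega), List.length_set]; exact h2)
      (by
        intro p hp hpm
        dsimp only
        rw [PySem.List.pySetD_of_nonneg _ _ (by omega),
            show ((n : Int)).toNat = n from by omega, List.getD_eq_getElem?_getD]
        rcases (by omega : p = n ∨ n + 1 ≤ p) with hp1 | hp1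
        · subst hp1
          rw [List.getElem?_set_self (by rw [h2]; omega)]
          simp only [Option.getD_some]
          rw [hb']
        · rw [List.getElem?_set_ne (by omega), ← List.getD_eq_getElem?_getD]
          exact h3 p (by omega) hpm)
    unfold pvB3 at this
    rw [show ((n : Nat) : Int) - 1 = (n : Int) - 1 from rfl] at this
    exact this

theorem pvFoldl_rel {α β γ : Type} (R : α → β → Prop) (f : α → γ → α) (g : β → γ → β)
    (l : List γ) (sa : α) (sb : β) (h : R sa sb)
    (hstep : ∀ x ∈ l, ∀ sa sb, R sa sb → R (f sa x) (g sb x)) :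
    R (l.foldl f sa) (l.foldl g sb) := by
  induction l generalizing sa sb with
  | nil => exact h
  | cons x xs ih =>
    simp only [List.foldl_cons]
    exact ih (f sa x) (g sb x) (hstep x (by simp) sa sb h)
      (fun y hy => hstep y (by simp [hy]))

theorem pvMain_core (nums : List Int) (k : Int) (hk : 1 ≤ k) (h3 : 3 * k ≤ (nums.length : Int))
    (dp idx : Int → Int → Int) (Wl left right : List Int)
    (htab : pvTabOK nums k (nums.length : Int) (dp, idx))
    (hWl : ∀ q : Int, 0 ≤ q → q ≤ (nums.length : Int) - k →
      PySem.List.pyGetD Wl q 0 = pvWin nums k.toNat q)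
    (hleft : ∀ q : Int, 0 ≤ q → q ≤ (nums.length : Int) - k →
      PySem.List.pyGetD left q 0 = pvBest (pvWin nums k.toNat) 0 q.toNat)
    (hright : ∀ q : Int, 0 ≤ q → q ≤ (nums.length : Int) - k →
      PySem.List.pyGetD right q 0 = pvBest (pvWin nums k.toNat) q (((nums.length : Int) - k - q).toNat)) :
    [((PySem.List.pyRange k ((nums.length : Int) - 2 * k + 1) 1).foldl
        (fun (st : Option Int × Option Int × Option Int × Option Int) i =>
          let ssum := dp 0 (i - 1) + dp i (i + k - 1) + dp (i + k) ((nums.length : Int) - 1)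
          if (match st.1 with | none => true | some m => decide (m < ssum)) then
            (some ssum, some (idx 0 (i - 1)), some (idx i (i + k - 1)), some (idx (i + k) ((nums.length : Int) - 1)))
          else st)
        (none, none, none, none)).2.1,
     ((PySem.List.pyRange k ((nums.length : Int) - 2 * k + 1) 1).foldl
        (fun (st : Option Int × Option Int × Option Int × Option Int) i =>
          let ssum := dp 0 (i - 1) + dp i (i + k - 1) + dp (i + k) ((nums.length : Int) - 1)
          if (match st.1 with | none => true | some m => decide (m < ssum)) then
            (some ssum, some (idx 0 (i - 1)), some (idx i (i + k - 1)), some (idx (i + k) ((nums.length : Int) - 1)))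
          else st)
        (none, none, none, none)).2.2.1,
     ((PySem.List.pyRange k ((nums.length : Int) - 2 * k + 1) 1).foldl
        (fun (st : Option Int × Option Int × Option Int × Option Int) i =>
          let ssum := dp 0 (i - 1) + dp i (i + k - 1) + dp (i + k) ((nums.length : Int) - 1)
          if (match st.1 with | none => true | some m => decide (m < ssum)) then
            (some ssum, some (idx 0 (i - 1)), some (idx i (i + k - 1)), some (idx (i + k) ((nums.length : Int) - 1)))
          else st)
        (none, none, none, none)).2.2.2] =
    ((PySem.List.pyRange k ((nums.length : Int) - 2 * k + 1) 1).foldl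
        (fun (st : List (Option Int) × Option Int) j =>
          let l := PySem.List.pyGetD left (j - k) 0
          let r := PySem.List.pyGetD right (j + k) 0
          let t := PySem.List.pyGetD Wl l 0 + PySem.List.pyGetD Wl j 0 + PySem.List.pyGetD Wl r 0
          if (match st.2 with | none => true | some tot => decide (tot < t)) then
            ([some l, some j, some r], some t)
          else st)
        ([none, none, none], none)).1 := by
  refine (pvFoldl_rel
    (fun (sa : Option Int × Option Int × Option Int × Option Int) (sb : List (Option Int) × Option Int) =>
      sb.2 = sa.1 ∧ sb.1 = [sa.2.1, sa.2.2.1, sa.2.2.2])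
    _ _ _ _ _ ⟨rfl, rfl⟩ ?_).2.symm
  intro i hi sa sb hR
  rw [PySem.List.mem_pyRange_one] at hi
  obtain ⟨h1, h2⟩ := hR
  dsimp only
  -- A's three table cells
  have hA1 : dp 0 (i - 1) = pvWin nums k.toNat (pvBest (pvWin nums k.toNat) 0 ((i - 1 - 0 + 1 - k).toNat)) :=
    (htab 0 (i - 1) (by omega) (by omega) (by omega) (by omega)).1
  have hI1 : idx 0 (i - 1) = pvBest (pvWin nums k.toNat) 0 ((i - 1 - 0 + 1 - k).toNat) :=
    (htab 0 (i - 1) (by omega) (by omega) (by omega) (by omega)).2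
  have hA2 : dp i (i + k - 1) = pvWin nums k.toNat (pvBest (pvWin nums k.toNat) i ((i + k - 1 - i + 1 - k).toNat)) :=
    (htab i (i + k - 1) (by omega) (by omega) (by omega) (by omega)).1
  have hI2 : idx i (i + k - 1) = pvBest (pvWin nums k.toNat) i ((i + k - 1 - i + 1 - k).toNat) :=
    (htab i (i + k - 1) (by omega) (by omega) (by omega) (by omega)).2
  have hA3 : dp (i + k) ((nums.length : Int) - 1) =
      pvWin nums k.toNat (pvBest (pvWin nums k.toNat) (i + k) (((nums.length : Int) - 1 - (i + k) + 1 - k).toNat)) :=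
    (htab (i + k) ((nums.length : Int) - 1) (by omega) (by omega) (by omega) (by omega)).1
  have hI3 : idx (i + k) ((nums.length : Int) - 1) =
      pvBest (pvWin nums k.toNat) (i + k) (((nums.length : Int) - 1 - (i + k) + 1 - k).toNat) :=
    (htab (i + k) ((nums.length : Int) - 1) (by omega) (by omega) (by omega) (by omega)).2
  rw [show (i - 1 - 0 + 1 - k).toNat = (i - k).toNat from by omega] at hA1 hI1
  rw [show (i + k - 1 - i + 1 - k).toNat = 0 from by omega] at hA2 hI2
  rw [show ((nums.length : Int) - 1 - (i + k) + 1 - k).toNat = ((nums.length : Int) - k - (i + k)).toNat from by omega] at hA3 hI3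
  rw [show pvBest (pvWin nums k.toNat) i 0 = i from rfl] at hA2 hI2
  -- B's three window starts
  have hBl : PySem.List.pyGetD left (i - k) 0 = pvBest (pvWin nums k.toNat) 0 (i - k).toNat :=
    hleft (i - k) (by omega) (by omega)
  have hBr : PySem.List.pyGetD right (i + k) 0 =
      pvBest (pvWin nums k.toNat) (i + k) (((nums.length : Int) - k - (i + k)).toNat) :=
    hright (i + k) (by omega) (by omega)
  have hcast1 : (((i - k).toNat : Nat) : Int) = i - k := by omega
  have hcast3 : ((((nums.length : Int) - k - (i + k)).toNat : Nat) : Int) = (nums.length : Int) - k - (i + k) := by omega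
  have hmem1 := pvBest_mem (pvWin nums k.toNat) 0 (i - k).toNat
  have hmem3 := pvBest_mem (pvWin nums k.toNat) (i + k) (((nums.length : Int) - k - (i + k)).toNat)
  have hWl_l : PySem.List.pyGetD Wl (pvBest (pvWin nums k.toNat) 0 (i - k).toNat) 0 =
      pvWin nums k.toNat (pvBest (pvWin nums k.toNat) 0 (i - k).toNat) :=
    hWl _ (by omega) (by omega)
  have hWl_m : PySem.List.pyGetD Wl i 0 = pvWin nums k.toNat i := hWl i (by omega) (by omega)
  have hWl_r : PySem.List.pyGetD Wl (pvBest (pvWin nums k.toNat) (i + k) (((nums.length : Int) - k - (i + k)).toNat)) 0 =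
      pvWin nums k.toNat (pvBest (pvWin nums k.toNat) (i + k) (((nums.length : Int) - k - (i + k)).toNat)) :=
    hWl _ (by omega) (by omega)
  rw [hA1, hA2, hA3, hI1, hI2, hI3, hBl, hBr, hWl_l, hWl_m, hWl_r, h1]
  cases hsa : sa.1 with
  | none =>
    exact ⟨rfl, rfl⟩
  | some mv =>
    by_cases hm : mv < pvWin nums k.toNat (pvBest (pvWin nums k.toNat) 0 (i - k).toNat) +
        pvWin nums k.toNat i +
        pvWin nums k.toNat (pvBest (pvWin nums k.toNat) (i + k) (((nums.length : Int) - k - (i + k)).toNat))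
    · simp [hm]
    · simp [hm, h1, h2]

-- ===== VERDICT (by name: the statement is the Claim_ definition above) =====
theorem maxSumOfThreeSubarrays_ming_spec : Claim_equal_maxSumOfThreeSubarrays_ming := by
  intro nums k hdom hpre
  unfold Spec_maxSumOfThreeSubarrays_ming
  have hk : 1 ≤ k := hpre
  unfold maxSumOfThreeSubarrays_ming maxSumOfThreeSubarrays_ming_alt
  dsimp only [PySem.List.len_eq]
  rcases (by omega : (nums.length : Int) < 3 * k ∨ 3 * k ≤ (nums.length : Int)) with h3 | h3
  · rw [if_pos (Or.inr h3),
        PySem.List.pyRange_one_eq_nil (show (nums.length : Int) - 2 * k + 1 ≤ k from by omega)]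
    rfl
  · rw [if_neg (by omega : ¬(k ≤ 0 ∨ (nums.length : Int) < 3 * k))]
    have hcm : ((((nums.length : Int) - k).toNat : Nat) : Int) = (nums.length : Int) - k := by omega
    -- A's tables
    have h1 := pvPhase1_tabOK nums k hk
    have h2 := pvPhase2_outer nums k hk _ h1 ((nums.length : Int) - k).toNat
    rw [show k + 1 + ((((nums.length : Int) - k).toNat : Nat) : Int) = (nums.length : Int) + 1 from by omega,
        show k + ((((nums.length : Int) - k).toNat : Nat) : Int) = (nums.length : Int) from by omega] at h2
    -- B's W array
    have hB1 := pvBLoop1 nums k hk (by omega) ((nums.length : Int) - k).toNat (by omega)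
    rw [hcm] at hB1
    obtain ⟨hB1s, hB1len, hB1get⟩ := hB1
    have hWl : ∀ q : Int, 0 ≤ q → q ≤ (nums.length : Int) - k →
        PySem.List.pyGetD (pvB1 nums k ((nums.length : Int) - k)).2 q 0 = pvWin nums k.toNat q := by
      intro q h0 hq
      rw [pvGetD_int _ _ h0]
      have h := hB1get q.toNat (by omega)
      rw [show ((q.toNat : Nat) : Int) = q from by omega] at h
      exact h
    -- B's left array
    have hB2 := pvBLoop2 (pvB1 nums k ((nums.length : Int) - k)).2 ((nums.length : Int) - k)
      (pvWin nums k.toNat) (by omega) hWl hB1len ((nums.length : Int) - k).toNat (by omega)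
    rw [hcm] at hB2
    obtain ⟨hB2b, hB2len, hB2get⟩ := hB2
    have hleft : ∀ q : Int, 0 ≤ q → q ≤ (nums.length : Int) - k →
        PySem.List.pyGetD (pvB2 (pvB1 nums k ((nums.length : Int) - k)).2 ((nums.length : Int) - k) ((nums.length : Int) - k)).2 q 0
          = pvBest (pvWin nums k.toNat) 0 q.toNat := by
      intro q h0 hq
      rw [pvGetD_int _ _ h0]
      exact hB2get q.toNat (by omega)
    -- B's right array
    have hB3 := pvBLoop3 (pvB1 nums k ((nums.length : Int) - k)).2 ((nums.length : Int) - k)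
      (pvWin nums k.toNat) (by omega) hWl ((nums.length : Int) - k).toNat (by omega)
      (((nums.length : Int) - k),
        PySem.List.pySetD (List.replicate (((nums.length : Int) - k) + 1).toNat 0)
          ((nums.length : Int) - k) ((nums.length : Int) - k))
      (by
        dsimp only
        rw [hcm, show ((nums.length : Int) - k - ((nums.length : Int) - k)).toNat = 0 from by omega]
        rfl)
      (by
        dsimp only
        rw [PySem.List.pySetD_of_nonneg _ _ (by omega), List.length_set, List.length_replicate])
      (by
        intro p hp hpm
        dsimp only
        have hpe : p = ((nums.length : Int) - k).toNat := by omega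
        subst hpe
        rw [PySem.List.pySetD_of_nonneg _ _ (by omega), List.getD_eq_getElem?_getD,
            show ((nums.length : Int) - k).toNat = (((nums.length : Int) - k).toNat : Nat) from rfl,
            List.getElem?_set_self (by rw [List.length_replicate]; omega)]
        simp only [Option.getD_some]
        rw [hcm, show ((nums.length : Int) - k - ((nums.length : Int) - k)).toNat = 0 from by omega]
        rfl)
    rw [hcm] at hB3
    obtain ⟨hB3b, hB3len, hB3get⟩ := hB3
    have hright : ∀ q : Int, 0 ≤ q → q ≤ (nums.length : Int) - k →
        PySem.List.pyGetD (pvB3 (pvB1 nums k ((nums.length : Int) - k)).2 (((nums.length : Int) - k) - 1)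
          (((nums.length : Int) - k),
            PySem.List.pySetD (List.replicate (((nums.length : Int) - k) + 1).toNat 0)
              ((nums.length : Int) - k) ((nums.length : Int) - k))).2 q 0
          = pvBest (pvWin nums k.toNat) q (((nums.length : Int) - k - q).toNat) := by
      intro q h0 hq
      rw [pvGetD_int _ _ h0]
      have h := hB3get q.toNat (by omega)
      rw [show ((q.toNat : Nat) : Int) = q from by omega] at h
      exact h
    exact pvMain_core nums k hk h3 _ _ _ _ _ h2 hWl hleft hright
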